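-- pv_equiv track=rewrite | github.com/kevin123488/algorithm | 2024/10월/1013/pccp_puzzle.py | solution
-- ===== SOURCE A (Python) =====
-- def check_ans(answer, diffs, times, limit):
--     n = len(diffs)
--     check_limit = 0
--     for i in range(n):
--         if answer >= diffs[i]:
--             check_limit += times[i]
--         else:
--             if i == 0:
--                 check_limit += (diffs[i] - answer) * times[i]
--             else:
--                 check_limit += (times[i - 1] + times[i]) * (diffs[i] - answer)
--             check_limit += times[i]
--         # if check_limit > limit:
--         #     return False
--
--     if check_limit <= limit:
--         return 1
--     else:
--         return 0
--
-- def solution(diffs, times, limit):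
--     answer = 0
--
--     # n개의 퍼즐 시간 내에 풀어야 함
--     # 퍼즐당 난이도와 소요 시간이 있음
--     # 현 퍼즐 난이도: diff, 현 퍼즐 소요 시간: time_cur,
--     # 전 퍼즐 소요 시간: time_prev, 숙련도: level
--     # 내 수준이 현 퍼즐 난이도 이상이다 -> 안틀리고 time_cur 시간 써서 해결
--     # 난이도가 내 수준 초과다 -> 퍼즐을 난이도 - 숙련도의 횟수 만큼 틀림
--     # 퍼즐 틀릴 때 마다 time_cur 만큼의 시간을 씀, time_prev 만큼의 시간을 써서 이전 퍼즐 풀어야 함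
--     # 이전 퍼즐을 풀 땐 틀리지 않음
--     # 난이도 - 숙련도 횟수 만큼 틀린 후 다시 퍼즐을 풀면 time_cur 만큼 시간 써서 문제 해결
--     # 요약: 숙련도가 난이도 이상이다 -> time_cur
--     # 숙련도가 난이도 초과다 -> (time_cur + time_prev) * (diff - level) + time_cur
--     # 주어진 시간 limit 안에 퍼즐을 모두 해결하기 위한 숙련도의 최솟값을 구하기
--
--     # 간단히 생각하면 level을 1부터 1씩 올려가며 시간 내에 모든 문제를 해결할 수 있는
--     # 최솟값을 구하면 됨
--     # 그러나 그렇게 하면 시간이 오버될 것. 여기선 수학적으로 푸는게 맞는 것 같다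
--     # 일단 level의 범위는 1 ~ max(diffs)
--     # 이분탐색을 사용하는게 좋을듯. 시작은 max(diffs) 일 때, 리밋 이내로 풀리면 max(diffs) // 2
--
--     start = 1
--     end = max(diffs)
--
--     # limit 내로 풀리면 answer를 절반씩 줄여가며 계산
--     # 탐색 대상이 7
--     # 시작 answer가 20, end가 20, start가 1
--     # start, answer, end
--     # 1, 10, 20
--     # 1, 5, 10
--     # 5, 7, 10
--
--     while start <= end:
--         semi_answer = (start + end) // 2
--         if check_ans(semi_answer, diffs, times, limit) == 1: # 지금 level로 limit 내의 시간에
--             # 문제를 다 풀 수 있다면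
--             end = semi_answer - 1
--             answer = semi_answer
--         else:
--             # 지금 level로 문제 다 못풀면
--             start = semi_answer + 1
--
--     return answer
-- ===== SOURCE B (Python) =====
-- def solution(diffs, times, limit):
--     n = len(diffs)
--     base = sum(times[i] for i in range(n))
--     pairs = sorted(((diffs[i], (times[i - 1] if i else 0) + times[i]) for i in range(n)),
--                    key=lambda p: p[0])
--     suf = [(0, 0)]  # suffix sums of (c, d*c) over pairs, built from the right
--     for d, c in reversed(pairs):
--         sc, scd = suf[-1]
--         suf.append((sc + c, scd + d * c))
--     suf.reverse()
--
--     def cost(level):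
--         # first index whose difficulty exceeds level (hand-rolled bisect_right)
--         lo, hi = 0, n
--         while lo < hi:
--             mid = (lo + hi) // 2
--             if pairs[mid][0] <= level:
--                 lo = mid + 1
--             else:
--                 hi = mid
--         sc, scd = suf[lo]
--         return base + scd - level * sc
--
--     answer = 0
--     start, end = 1, max(diffs)
--     while start <= end:
--         semi = (start + end) // 2
--         if cost(semi) <= limit:
--             end = semi - 1
--             answer = semi
--         else:
--             start = semi + 1
--     return answer
-- ===== Notes on version B (the rewrite author's own statement) =====
-- stated objective: alternative
-- what changed: B keeps the same binary descent over the proficiency level but answers each feasibility probe from a difficulty-sorted pair list with precomputed suffix sums and a hand-rolled bisect (O(log n) per probe), instead of A's full O(n) rescan of all puzzles inside every probe.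
-- outside the precondition, e.g. on solution([-5312], [], 3): A returns 0, B raises IndexError
import Mathlib
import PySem

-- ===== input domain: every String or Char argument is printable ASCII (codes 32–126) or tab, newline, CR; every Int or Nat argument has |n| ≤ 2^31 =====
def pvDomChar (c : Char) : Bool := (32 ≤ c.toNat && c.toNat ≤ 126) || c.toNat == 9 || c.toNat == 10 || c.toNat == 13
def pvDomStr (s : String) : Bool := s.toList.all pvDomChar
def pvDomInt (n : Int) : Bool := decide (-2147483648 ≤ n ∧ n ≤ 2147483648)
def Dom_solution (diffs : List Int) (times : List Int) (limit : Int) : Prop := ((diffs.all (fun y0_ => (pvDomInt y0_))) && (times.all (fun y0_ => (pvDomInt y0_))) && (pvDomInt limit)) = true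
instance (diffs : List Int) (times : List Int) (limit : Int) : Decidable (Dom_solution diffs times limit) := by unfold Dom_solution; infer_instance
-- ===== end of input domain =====

-- B keeps A's binary descent over the level but answers each feasibility query from a sorted
-- difficulty list with precomputed suffix sums and a hand-rolled bisect, instead of rescanning
-- all puzzles per probe.

-- ===== PORT A =====
-- indices diffs[i], times[i], times[i-1] are in range under Pre_solution, so they are ported as pyGetD _ _ 0
def check_ans (answer : Int) (diffs : List Int) (times : List Int) (limit : Int) : Int :=
  let check_limit :=
    (PySem.List.pyRange 0 (diffs.length : Int)).foldl (fun acc i =>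
      if answer ≥ PySem.List.pyGetD diffs i 0 then
        acc + PySem.List.pyGetD times i 0
      else
        (if i = 0 then
          acc + (PySem.List.pyGetD diffs i 0 - answer) * PySem.List.pyGetD times i 0
        else
          acc + (PySem.List.pyGetD times (i - 1) 0 + PySem.List.pyGetD times i 0) *
            (PySem.List.pyGetD diffs i 0 - answer))
        + PySem.List.pyGetD times i 0) 0
  if check_limit ≤ limit then 1 else 0

def solutionLoop (diffs : List Int) (times : List Int) (limit : Int)
    (start end_ answer : Int) : Int :=
  if h : start ≤ end_ then
    if check_ans (PySem.Int.floordiv (start + end_) 2) diffs times limit = 1 then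
      solutionLoop diffs times limit start (PySem.Int.floordiv (start + end_) 2 - 1)
        (PySem.Int.floordiv (start + end_) 2)
    else
      solutionLoop diffs times limit (PySem.Int.floordiv (start + end_) 2 + 1) end_ answer
  else answer
termination_by (end_ - start + 1).toNat
decreasing_by
  · obtain ⟨h1, h2⟩ := PySem.Int.floordiv_two_mid_bounds h; omega
  · obtain ⟨h1, h2⟩ := PySem.Int.floordiv_two_mid_bounds h; omega

-- max(diffs) raises on an empty list (excluded by Pre_solution); the placeholder 0 is never used there
def solution (diffs : List Int) (times : List Int) (limit : Int) : Int :=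
  solutionLoop diffs times limit 1 ((PySem.List.max? diffs (fun y => y)).getD 0) 0

-- ===== PORT B =====
-- base = sum(times[i] for i in range(n))
def pvBase (diffs : List Int) (times : List Int) : Int :=
  (PySem.List.pyRange 0 (diffs.length : Int)).foldl
    (fun acc i => acc + PySem.List.pyGetD times i 0) 0

-- pairs = sorted(((diffs[i], (times[i-1] if i else 0) + times[i]) for i in range(n)), key=lambda p: p[0])
def pvPairs (diffs : List Int) (times : List Int) : List (Int × Int) :=
  PySem.List.sorted
    ((PySem.List.pyRange 0 (diffs.length : Int)).map (fun i =>
      (PySem.List.pyGetD diffs i 0,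
        (if i = 0 then 0 else PySem.List.pyGetD times (i - 1) 0) + PySem.List.pyGetD times i 0)))
    (fun p => p.1)

-- suf: built by appending while reading suf[-1], then reversed, exactly as in Source B
def pvSuf (pairs : List (Int × Int)) : List (Int × Int) :=
  (pairs.reverse.foldl (fun suf p =>
    suf ++ [((suf.getLastD (0, 0)).1 + p.2, (suf.getLastD (0, 0)).2 + p.1 * p.2)])
    [(0, 0)]).reverse

-- the hand-rolled bisect_right of Source B's cost()
def pvBisect (pairs : List (Int × Int)) (level : Int) (lo hi : Int) : Int :=
  if h : lo < hi then
    if (PySem.List.pyGetD pairs (PySem.Int.floordiv (lo + hi) 2) (0, 0)).1 ≤ level then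
      pvBisect pairs level (PySem.Int.floordiv (lo + hi) 2 + 1) hi
    else
      pvBisect pairs level lo (PySem.Int.floordiv (lo + hi) 2)
  else lo
termination_by (hi - lo).toNat
decreasing_by
  · have h1 := (PySem.Int.le_floordiv_iff_mul_le (a := lo + hi) (b := 2) (q := lo) (by omega)).mpr (by omega)
    omega
  · have h2 := (PySem.Int.floordiv_lt_iff_lt_mul (a := lo + hi) (b := 2) (q := hi) (by omega)).mpr (by omega)
    omega

def pvCost (base : Int) (pairs suf : List (Int × Int)) (level : Int) : Int :=
  base +
    (PySem.List.pyGetD suf (pvBisect pairs level 0 (pairs.length : Int)) (0, 0)).2 -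
    level * (PySem.List.pyGetD suf (pvBisect pairs level 0 (pairs.length : Int)) (0, 0)).1

def altLoop (base : Int) (pairs suf : List (Int × Int)) (limit : Int)
    (start end_ answer : Int) : Int :=
  if h : start ≤ end_ then
    if pvCost base pairs suf (PySem.Int.floordiv (start + end_) 2) ≤ limit then
      altLoop base pairs suf limit start (PySem.Int.floordiv (start + end_) 2 - 1)
        (PySem.Int.floordiv (start + end_) 2)
    else
      altLoop base pairs suf limit (PySem.Int.floordiv (start + end_) 2 + 1) end_ answer
  else answer
termination_by (end_ - start + 1).toNat
decreasing_by
  · obtain ⟨h1, h2⟩ := PySem.Int.floordiv_two_mid_bounds h; omega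
  · obtain ⟨h1, h2⟩ := PySem.Int.floordiv_two_mid_bounds h; omega

def solution_alt (diffs : List Int) (times : List Int) (limit : Int) : Int :=
  altLoop (pvBase diffs times) (pvPairs diffs times) (pvSuf (pvPairs diffs times)) limit
    1 ((PySem.List.max? diffs (fun y => y)).getD 0) 0

-- ===== PRECONDITION & SPEC =====
-- Pre_ excludes the inputs where A raises (max(diffs) raises ValueError on empty diffs; times[i]
-- raises IndexError when times is shorter than diffs); when times is too short but max(diffs) < 1,
-- A returns 0 without ever reading times, while B's eager precomputation raises IndexError there.
def Pre_solution (diffs : List Int) (times : List Int) (limit : Int) : Prop :=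
  diffs ≠ [] ∧ diffs.length ≤ times.length
instance (diffs : List Int) (times : List Int) (limit : Int) : Decidable (Pre_solution diffs times limit) := by
  unfold Pre_solution; infer_instance

def pvWitness_solution : List Int × List Int × Int := ([3, 1], [2, 4], 30)

def Spec_solution (diffs : List Int) (times : List Int) (limit : Int) (out : Int) : Prop :=
  out = solution_alt diffs times limit
instance (diffs : List Int) (times : List Int) (limit : Int) (out : Int) : Decidable (Spec_solution diffs times limit out) := by
  unfold Spec_solution; infer_instance

-- ===== CLAIM (what is proved, stated in full; the proofs are below) =====
def Claim_equal_solution : Prop := ∀ (diffs : List Int) (times : List Int) (limit : Int), Dom_solution diffs times limit → Pre_solution diffs times limit → Spec_solution diffs times limit (solution diffs times limit)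

-- ===== LEMMAS AND PROOFS =====

-- the contribution of one puzzle (difficulty d, retry coefficient c) beyond its base time
def pvGterm (level : Int) (p : Int × Int) : Int :=
  if level < p.1 then p.2 * (p.1 - level) else 0

-- the unsorted argument of sorted(...) in Source B
def pvRaw (diffs : List Int) (times : List Int) : List (Int × Int) :=
  (PySem.List.pyRange 0 (diffs.length : Int)).map (fun i =>
    (PySem.List.pyGetD diffs i 0,
      (if i = 0 then 0 else PySem.List.pyGetD times (i - 1) 0) + PySem.List.pyGetD times i 0))

-- A's accumulated check_limit is base + Σ pvGterm over the raw pairs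
lemma fold_eq (answer : Int) (diffs times : List Int) :
    (PySem.List.pyRange 0 (diffs.length : Int)).foldl (fun acc i =>
      if answer ≥ PySem.List.pyGetD diffs i 0 then
        acc + PySem.List.pyGetD times i 0
      else
        (if i = 0 then
          acc + (PySem.List.pyGetD diffs i 0 - answer) * PySem.List.pyGetD times i 0
        else
          acc + (PySem.List.pyGetD times (i - 1) 0 + PySem.List.pyGetD times i 0) *
            (PySem.List.pyGetD diffs i 0 - answer))
        + PySem.List.pyGetD times i 0) 0 =
      pvBase diffs times + ((pvRaw diffs times).map (pvGterm answer)).sum := by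
  rw [PySem.List.foldl_congr_mem _ _
      (fun acc i => acc + (PySem.List.pyGetD times i 0 +
        pvGterm answer (PySem.List.pyGetD diffs i 0,
          (if i = 0 then 0 else PySem.List.pyGetD times (i - 1) 0) +
            PySem.List.pyGetD times i 0))) 0 ?_]
  · rw [PySem.List.foldl_add]
    unfold pvBase pvRaw
    rw [PySem.List.foldl_add, List.map_map, PySem.List.sum_map_add_int]
    ring_nf
    rfl
  · intro acc i _
    unfold pvGterm
    by_cases hge : answer ≥ PySem.List.pyGetD diffs i 0
    · have hnl : ¬ answer < PySem.List.pyGetD diffs i 0 := by omega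
      simp only [if_pos hge, if_neg hnl]
      ring
    · have hlt : answer < PySem.List.pyGetD diffs i 0 := by omega
      by_cases h00 : i = 0
      · simp only [if_neg hge, if_pos hlt, if_pos h00]
        ring
      · simp only [if_neg hge, if_pos hlt, if_neg h00]
        ring

-- structural form of pvSuf
def pvSufR : List (Int × Int) → List (Int × Int)
  | [] => [(0, 0)]
  | p :: rest =>
      (((pvSufR rest).headD (0, 0)).1 + p.2, ((pvSufR rest).headD (0, 0)).2 + p.1 * p.2) ::
        pvSufR rest

lemma pvSuf_eq_sufR (pairs : List (Int × Int)) : pvSuf pairs = pvSufR pairs := by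
  induction pairs with
  | nil => rfl
  | cons p rest ih =>
      unfold pvSuf at *
      rw [List.reverse_cons, List.foldl_append]
      simp only [List.foldl_cons, List.foldl_nil]
      rw [List.reverse_append]
      simp only [List.reverse_cons, List.reverse_nil, List.nil_append, List.cons_append,
        List.nil_append]
      rw [pvSufR]
      rw [← ih]
      congr 1
      · have : (List.foldl (fun suf p =>
            suf ++ [((suf.getLastD (0, 0)).1 + p.2, (suf.getLastD (0, 0)).2 + p.1 * p.2)])
            [(0, 0)] rest.reverse).getLastD (0, 0) =
            ((List.foldl (fun suf p =>
              suf ++ [((suf.getLastD (0, 0)).1 + p.2, (suf.getLastD (0, 0)).2 + p.1 * p.2)])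
              [(0, 0)] rest.reverse).reverse).headD (0, 0) := by
          rw [List.getLastD_eq_getLast?, ← List.head?_reverse]
          cases (List.foldl (fun suf p =>
              suf ++ [((suf.getLastD (0, 0)).1 + p.2, (suf.getLastD (0, 0)).2 + p.1 * p.2)])
              [(0, 0)] rest.reverse).reverse <;> rfl
        rw [this]
  
lemma pvSufR_length (pairs : List (Int × Int)) : (pvSufR pairs).length = pairs.length + 1 := by
  induction pairs with
  | nil => rfl
  | cons p rest ih => simp [pvSufR, ih]

lemma pvSufR_getD (pairs : List (Int × Int)) :
    ∀ k : Nat, k ≤ pairs.length →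
      (pvSufR pairs).getD k (0, 0) =
        (((pairs.drop k).map (fun p => p.2)).sum,
         ((pairs.drop k).map (fun p => p.1 * p.2)).sum) := by
  induction pairs with
  | nil =>
      intro k hk
      have hk0 : k = 0 := by simpa using hk
      subst hk0
      rfl
  | cons p rest ih =>
      intro k hk
      cases k with
      | zero =>
          simp only [pvSufR, List.getD_cons_zero, List.drop_zero, List.map_cons, List.sum_cons]
          have h0 := ih 0 (by omega)
          have hh : (pvSufR rest).headD (0, 0) = (pvSufR rest).getD 0 (0, 0) := by
            cases pvSufR rest <;> rfl
          rw [hh, h0]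
          simp only [List.drop_zero, Prod.mk.injEq]
          exact ⟨by ring, by ring⟩
      | succ k' =>
          simp only [pvSufR, List.getD_cons_succ, List.drop_succ_cons]
          exact ih k' (by simp only [List.length_cons] at hk; omega)

-- bisect invariant: on a list pairwise-sorted by first component, pvBisect returns the
-- first index whose difficulty exceeds level
lemma pvBisect_spec (pairs : List (Int × Int)) (level : Int)
    (hp : pairs.Pairwise (fun a b => a.1 ≤ b.1)) :
    ∀ (n : Nat) (lo hi : Int), (hi - lo).toNat ≤ n → 0 ≤ lo → lo ≤ hi → hi ≤ (pairs.length : Int) →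
    (∀ i : Nat, i < lo.toNat → (pairs.getD i (0, 0)).1 ≤ level) →
    (∀ i : Nat, hi.toNat ≤ i → i < pairs.length → level < (pairs.getD i (0, 0)).1) →
    0 ≤ pvBisect pairs level lo hi ∧ pvBisect pairs level lo hi ≤ (pairs.length : Int) ∧
    (∀ i : Nat, i < (pvBisect pairs level lo hi).toNat → (pairs.getD i (0, 0)).1 ≤ level) ∧
    (∀ i : Nat, (pvBisect pairs level lo hi).toNat ≤ i → i < pairs.length →
      level < (pairs.getD i (0, 0)).1) := by
  have hpg : ∀ (i j : Nat), i ≤ j → j < pairs.length →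
      (pairs.getD i (0, 0)).1 ≤ (pairs.getD j (0, 0)).1 := by
    intro i j hij hj
    rcases Nat.eq_or_lt_of_le hij with rfl | hlt
    · exact le_refl _
    · rw [List.getD_eq_getElem pairs (0,0) (by omega), List.getD_eq_getElem pairs (0,0) hj]
      exact (List.pairwise_iff_getElem.mp hp) i j (by omega) hj hlt
  intro n
  induction n with
  | zero =>
      intro lo hi hfuel h0 hlh hhl hlow hhigh
      rw [pvBisect, dif_neg (by omega)]
      exact ⟨h0, by omega, fun i hi' => hlow i hi', fun i hi1 hi2 => hhigh i (by omega) hi2⟩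
  | succ n ih =>
      intro lo hi hfuel h0 hlh hhl hlow hhigh
      rw [pvBisect]
      by_cases hlt : lo < hi
      · rw [dif_pos hlt]
        have hmlo := (PySem.Int.le_floordiv_iff_mul_le (a := lo + hi) (b := 2) (q := lo) (by omega)).mpr (by omega)
        have hmhi := (PySem.Int.floordiv_lt_iff_lt_mul (a := lo + hi) (b := 2) (q := hi) (by omega)).mpr (by omega)
        set mid := PySem.Int.floordiv (lo + hi) 2 with hmid
        have hmid0 : 0 ≤ mid := by omega
        have hmidlen : mid < (pairs.length : Int) := by omega
        have hacc : PySem.List.pyGetD pairs mid (0, 0) = pairs.getD mid.toNat (0, 0) := by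
          rw [PySem.List.pyGetD_eq_getElem pairs (0,0) hmid0 (by push_cast; omega),
            List.getD_eq_getElem pairs (0,0) (by omega)]
        by_cases hc : (PySem.List.pyGetD pairs mid (0, 0)).1 ≤ level
        · rw [if_pos hc]
          apply ih (mid + 1) hi (by omega) (by omega) (by omega) hhl
          · intro i hi'
            have : i ≤ mid.toNat := by omega
            exact le_trans (hpg i mid.toNat this (by omega)) (by rw [← hacc]; exact hc)
          · exact hhigh
        · rw [if_neg hc]
          apply ih lo mid (by omega) h0 (by omega) (by omega) hlow
          intro i hi1 hi2
          have : mid.toNat ≤ i := hi1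
          exact lt_of_lt_of_le (by rw [← hacc] at *; omega) (hpg mid.toNat i this hi2)
      · rw [dif_neg hlt]
        exact ⟨h0, by omega, fun i hi' => hlow i hi', fun i hi1 hi2 => hhigh i (by omega) hi2⟩

-- Σ pvGterm over a list split at the threshold index
lemma sum_gterm_split (level : Int) :
    ∀ (pairs : List (Int × Int)) (k : Nat), k ≤ pairs.length →
    (∀ i : Nat, i < k → (pairs.getD i (0, 0)).1 ≤ level) →
    (∀ i : Nat, k ≤ i → i < pairs.length → level < (pairs.getD i (0, 0)).1) →
    (pairs.map (pvGterm level)).sum =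
      ((pairs.drop k).map (fun p => p.1 * p.2)).sum -
        level * ((pairs.drop k).map (fun p => p.2)).sum := by
  intro pairs
  induction pairs with
  | nil =>
      intro k hk _ _
      have hk0 : k = 0 := by simpa using hk
      subst hk0
      simp
  | cons p rest ih =>
      intro k hk hlow hhigh
      cases k with
      | zero =>
          have hp0 : level < p.1 := by
            have := hhigh 0 (by omega) (by simp)
            simpa using this
          simp only [List.map_cons, List.sum_cons, List.drop_zero]
          rw [ih 0 (by omega) (by omega)
            (fun i _ hi2 => by
              have := hhigh (i + 1) (by omega) (by simpa using hi2)
              simpa using this)]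
          simp only [List.drop_zero]
          unfold pvGterm
          rw [if_pos hp0]
          ring
      | succ k' =>
          have hp0 : p.1 ≤ level := by
            have := hlow 0 (by omega)
            simpa using this
          simp only [List.map_cons, List.sum_cons, List.drop_succ_cons]
          rw [ih k' (by simp only [List.length_cons] at hk; omega)
            (fun i hi1 => by
              have := hlow (i + 1) (by omega)
              simpa using this)
            (fun i hi1 hi2 => by
              have := hhigh (i + 1) (by omega) (by simpa using hi2)
              simpa using this)]
          unfold pvGterm
          rw [if_neg (by omega)]
          ring

-- each probe of B computes exactly A's check_limit
lemma cost_eq (diffs times : List Int) (level : Int) :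
    pvCost (pvBase diffs times) (pvPairs diffs times) (pvSuf (pvPairs diffs times)) level =
      pvBase diffs times + ((pvRaw diffs times).map (pvGterm level)).sum := by
  unfold pvCost
  set pairs := pvPairs diffs times with hpairs
  have hperm : pairs.Perm (pvRaw diffs times) := PySem.List.sorted_perm _ _ _
  have hsum : (pairs.map (pvGterm level)).sum = ((pvRaw diffs times).map (pvGterm level)).sum :=
    (hperm.map (pvGterm level)).sum_eq
  have hsorted : pairs.Pairwise (fun a b => a.1 ≤ b.1) :=
    PySem.List.sorted_pairwise _ _
  obtain ⟨hb0, hblen, hblow, hbhigh⟩ :=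
    pvBisect_spec pairs level hsorted (pairs.length : Int).toNat 0 (pairs.length : Int)
      (by omega) (by omega) (by omega) (by omega)
      (by omega) (fun i hi1 hi2 => by omega)
  set r := pvBisect pairs level 0 (pairs.length : Int) with hr
  have hsuf : PySem.List.pyGetD (pvSuf pairs) r (0, 0) =
      (((pairs.drop r.toNat).map (fun p => p.2)).sum,
       ((pairs.drop r.toNat).map (fun p => p.1 * p.2)).sum) := by
    rw [pvSuf_eq_sufR]
    rw [PySem.List.pyGetD_eq_getElem (pvSufR pairs) (0,0) hb0
      (by rw [pvSufR_length]; omega)]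
    rw [← List.getD_eq_getElem (pvSufR pairs) (0,0) (by rw [pvSufR_length]; omega)]
    exact pvSufR_getD pairs r.toNat (by omega)
  rw [hsuf]
  simp only
  rw [← hsum, sum_gterm_split level pairs r.toNat (by omega) hblow hbhigh]
  ring

lemma check_iff (diffs times : List Int) (limit level : Int) :
    check_ans level diffs times limit = 1 ↔
      pvCost (pvBase diffs times) (pvPairs diffs times) (pvSuf (pvPairs diffs times)) level ≤ limit := by
  rw [cost_eq]
  unfold check_ans
  rw [fold_eq]
  by_cases h : pvBase diffs times + ((pvRaw diffs times).map (pvGterm level)).sum ≤ limit <;>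
    simp [h]

lemma loops_eq (diffs times : List Int) (limit : Int) :
    ∀ (n : Nat) (start end_ answer : Int), (end_ - start + 1).toNat ≤ n →
    solutionLoop diffs times limit start end_ answer =
      altLoop (pvBase diffs times) (pvPairs diffs times) (pvSuf (pvPairs diffs times)) limit
        start end_ answer := by
  intro n
  induction n with
  | zero =>
      intro start end_ answer hfuel
      rw [solutionLoop, altLoop, dif_neg (by omega), dif_neg (by omega)]
  | succ n ih =>
      intro start end_ answer hfuel
      rw [solutionLoop, altLoop]
      by_cases hse : start ≤ end_
      · rw [dif_pos hse, dif_pos hse]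
        obtain ⟨hm1, hm2⟩ := PySem.Int.floordiv_two_mid_bounds hse
        by_cases hc : check_ans (PySem.Int.floordiv (start + end_) 2) diffs times limit = 1
        · rw [if_pos hc, if_pos ((check_iff diffs times limit _).mp hc)]
          exact ih _ _ _ (by omega)
        · rw [if_neg hc, if_neg (fun hcost => hc ((check_iff diffs times limit _).mpr hcost))]
          exact ih _ _ _ (by omega)
      · rw [dif_neg hse, dif_neg hse]

-- ===== VERDICT (by name: the statement is the Claim_ definition above) =====
theorem solution_spec : Claim_equal_solution := by
  intro diffs times limit _ _
  show solution diffs times limit = solution_alt diffs times limit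
  unfold solution solution_alt
  exact loops_eq diffs times limit
    (((PySem.List.max? diffs (fun y => y)).getD 0) - 1 + 1).toNat 1
    ((PySem.List.max? diffs (fun y => y)).getD 0) 0 (by omega)
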